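-- pv_equiv track=rewrite | github.com/KPreetham28/PSquarePlusSamplePyTest1 | PythonExample001.py | rearrange_word
-- ===== SOURCE A (Python) =====
-- def rearrange_word(word, num):
--     # Check if the length of the word is divisible by the given number
--     if len(word) % num != 0:
--         return "Invalid input: Length of the word is not divisible by the given number"
--
--     # Calculate the size of each chunk
--     chunk_size = len(word) // num
--
--     # Rearrange the word
--     rearranged_word = ""
--     for i in range(num):
--         chunk = word[i * chunk_size : (i + 1) * chunk_size]
--         rearranged_word += chunk[::-1]  # Reverse each chunk and concatenate
--     return rearranged_word
-- ===== SOURCE B (Python) =====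
-- def rearrange_word(word, num):
--     # Same guard as A (preserves the invalid-input message; num == 0 still divides by zero).
--     if len(word) % num != 0:
--         return "Invalid input: Length of the word is not divisible by the given number"
--     chunk_size = len(word) // num
--     # Single streaming pass: prepend each character to a buffer (so the buffer holds the
--     # current chunk already reversed) and flush it to the output whenever it is full.
--     parts = []
--     buf = ""
--     for ch in word:
--         buf = ch + buf
--         if len(buf) == chunk_size:
--             parts.append(buf)
--             buf = ""
--     return "".join(parts)
-- ===== Notes on version B (the rewrite author's own statement) =====
-- stated objective: alternative
-- what changed: Instead of an index loop that slices and reverses each chunk, B makes a single streaming pass over the characters, prepending each one to a buffer (so the buffer is the current chunk already reversed) and flushing the buffer to the output whenever it reaches the chunk size.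
import Mathlib
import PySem

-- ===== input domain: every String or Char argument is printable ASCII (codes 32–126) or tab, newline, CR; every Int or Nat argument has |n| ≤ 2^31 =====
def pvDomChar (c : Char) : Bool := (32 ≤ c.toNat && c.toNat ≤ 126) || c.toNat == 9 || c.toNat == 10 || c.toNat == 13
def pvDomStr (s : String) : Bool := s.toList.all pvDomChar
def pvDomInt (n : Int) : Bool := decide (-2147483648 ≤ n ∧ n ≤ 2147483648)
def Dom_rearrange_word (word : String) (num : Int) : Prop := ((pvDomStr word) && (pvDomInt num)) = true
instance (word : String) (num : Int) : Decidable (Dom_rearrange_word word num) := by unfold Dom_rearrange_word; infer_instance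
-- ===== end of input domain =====

-- B replaces A's index-and-slice chunk loop by a single streaming pass that prepends each
-- character to a buffer and flushes the buffer whenever it is full (objective: alternative
-- decomposition, same cost).

-- ===== PORT A =====
def rearrange_word (word : String) (num : Int) : String :=
  let cs := word.toList
  if PySem.Int.mod (cs.length : Int) num ≠ 0 then
    "Invalid input: Length of the word is not divisible by the given number"
  else
    let chunk_size := PySem.Int.floordiv (cs.length : Int) num
    -- chunk[::-1] is List.reverse (PySem.List.slice?_none_none_neg_one); exact
    String.ofList ((PySem.List.pyRange 0 num 1).foldl
      (fun acc i =>
        acc ++ (PySem.List.slice cs (some (i * chunk_size)) (some ((i + 1) * chunk_size))).reverse) [])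

-- ===== PORT B =====
-- one step of B's streaming loop: state = (flushed parts, current buffer, chunk size)
def pvStepB (chunk_size : Int) (st : List (List Char) × List Char) (ch : Char) :
    List (List Char) × List Char :=
  let buf := ch :: st.2           -- buf = ch + buf (buffer kept reversed)
  if (buf.length : Int) = chunk_size then (st.1 ++ [buf], []) else (st.1, buf)

def rearrange_word_alt (word : String) (num : Int) : String :=
  let cs := word.toList
  if PySem.Int.mod (cs.length : Int) num ≠ 0 then
    "Invalid input: Length of the word is not divisible by the given number"
  else
    let chunk_size := PySem.Int.floordiv (cs.length : Int) num
    let final := cs.foldl (pvStepB chunk_size) ([], [])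
    String.ofList final.1.flatten   -- ''.join(parts)

-- ===== PRECONDITION & SPEC =====
-- Pre_ excludes only num = 0, on which Python A raises ZeroDivisionError in 'len(word) % num'.
def Pre_rearrange_word (word : String) (num : Int) : Prop := num ≠ 0
instance (word : String) (num : Int) : Decidable (Pre_rearrange_word word num) := by unfold Pre_rearrange_word; infer_instance
def pvWitness_rearrange_word : String × Int := ("abcdef", 2)

def Spec_rearrange_word (word : String) (num : Int) (out : String) : Prop := out = rearrange_word_alt word num
instance (word : String) (num : Int) (out : String) : Decidable (Spec_rearrange_word word num out) := by unfold Spec_rearrange_word; infer_instance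

-- ===== CLAIM (what is proved, stated in full; the proofs are below) =====
def Claim_equal_rearrange_word : Prop := ∀ (word : String) (num : Int), Dom_rearrange_word word num → Pre_rearrange_word word num → Spec_rearrange_word word num (rearrange_word word num)

-- ===== LEMMAS AND PROOFS =====

-- Floor division of a positive by a negative integer is negative.
theorem pvFdivNeg (a b : Int) (ha : 0 < a) (hb : b < 0) : a.fdiv b < 0 := by
  obtain ⟨m, rfl⟩ : ∃ m : Nat, a = Int.ofNat (m + 1) := ⟨a.toNat - 1, by simp [Int.ofNat_eq_natCast]; omega⟩
  obtain ⟨n, rfl⟩ : ∃ n : Nat, b = Int.negSucc n := ⟨(-b).toNat - 1, by rw [Int.negSucc_eq]; omega⟩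
  have h : Int.fdiv (Int.ofNat (m + 1)) (Int.negSucc n) = Int.negSucc (m / (n + 1)) := rfl
  rw [h]; exact Int.negSucc_lt_zero _

-- With a negative chunk size the buffer never reaches it, so B flushes nothing.
theorem stepB_neg (k : Int) (hk : k < 0) :
    ∀ (cs : List Char) (out : List (List Char)) (buf : List Char),
      (List.foldl (pvStepB k) (out, buf) cs).1 = out := by
  intro cs
  induction cs with
  | nil => intro out buf; rfl
  | cons c ct ih =>
    intro out buf
    simp only [List.foldl_cons, pvStepB]
    rw [if_neg (by simp only [List.length_cons]; push_cast; omega)]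
    exact ih out (c :: buf)

-- Processing exactly the rest of a chunk flushes it once, reversed in front of the old buffer.
theorem stepB_chunk (k : Nat) :
    ∀ (xs : List Char) (buf : List Char) (out : List (List Char)),
      xs ≠ [] → buf.length + xs.length = k →
      List.foldl (pvStepB (k : Int)) (out, buf) xs = (out ++ [xs.reverse ++ buf], []) := by
  intro xs
  induction xs with
  | nil => intro _ _ h _; exact absurd rfl h
  | cons x xt ih =>
    intro buf out _ hlen
    simp only [List.foldl_cons, pvStepB]
    cases xt with
    | nil =>
      have hcond : (((x :: buf).length : Int)) = (k : Int) := by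
        simp only [List.length_cons, List.length_nil] at hlen ⊢; push_cast; omega
      rw [if_pos hcond]
      simp
    | cons y yt =>
      have hcond : ¬ ((((x :: buf).length : Int)) = (k : Int)) := by
        simp only [List.length_cons] at hlen ⊢; push_cast; omega
      rw [if_neg hcond]
      have hne : (y :: yt : List Char) ≠ [] := by simp
      have hlen2 : (x :: buf).length + (y :: yt).length = k := by
        simp only [List.length_cons] at hlen ⊢; omega
      rw [ih (x :: buf) out hne hlen2]
      simp

-- Main invariant of B's loop for a positive chunk size: the flushed parts are exactly the
-- reversed chunks, in order.
theorem stepB_main (k : Nat) (hk : 0 < k) :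
    ∀ (m : Nat) (cs : List Char) (out : List (List Char)), cs.length = m * k →
      (List.foldl (pvStepB (k : Int)) (out, []) cs).1
        = out ++ (List.range m).map (fun j => (List.take k (List.drop (j * k) cs)).reverse) := by
  intro m
  induction m with
  | zero =>
    intro cs out hlen
    have hnil : cs = [] := List.eq_nil_of_length_eq_zero (by omega)
    rw [hnil]
    simp
  | succ m ih =>
    intro cs out hlen
    have hkle : k ≤ cs.length := by
      rw [hlen]
      calc k = 1 * k := (one_mul k).symm
        _ ≤ (m + 1) * k := Nat.mul_le_mul_right k (by omega)
    have hsplit : cs = cs.take k ++ cs.drop k := (List.take_append_drop k cs).symm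
    have htlen : (cs.take k).length = k := by simp [hkle]
    have hdlen : (cs.drop k).length = m * k := by
      rw [List.length_drop, hlen, Nat.add_mul, Nat.one_mul]; omega
    conv_lhs => rw [hsplit]
    rw [List.foldl_append]
    rw [stepB_chunk k (cs.take k) [] out (by intro h; rw [h] at htlen; simp at htlen; omega)
        (by simp [htlen])]
    rw [ih (cs.drop k) (out ++ [(cs.take k).reverse ++ []]) hdlen]
    rw [List.append_assoc]
    congr 1
    rw [List.range_succ_eq_map]
    simp only [List.map_cons, List.map_map, Nat.zero_mul, List.drop_zero, List.append_nil,
      List.singleton_append]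
    congr 1
    apply List.map_congr_left
    intro j _
    simp only [Function.comp]
    congr 2
    rw [List.drop_drop]
    congr 1
    rw [Nat.succ_mul]; omega

-- A's foldl over the range, rewritten as a map + flatten of reversed take/drop chunks.
theorem a_side (k : Nat) (n : Nat) (cs : List Char) :
    (PySem.List.pyRange 0 (n : Int) 1).foldl
        (fun acc i =>
          acc ++ (PySem.List.slice cs (some (i * (k : Int))) (some ((i + 1) * (k : Int)))).reverse)
        []
      = (List.range n).flatMap (fun j => (List.take k (List.drop (j * k) cs)).reverse) := by
  rw [PySem.List.foldl_append_eq_flatMap, List.nil_append]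
  rw [PySem.List.pyRange_one 0 (n : Int)]
  simp only [sub_zero, Int.toNat_natCast, zero_add]
  rw [List.flatMap_map]
  apply List.flatMap_congr
  intro j _
  have ha : (0 : Int) ≤ (j : Int) * (k : Int) := by positivity
  have hb : (0 : Int) ≤ ((j : Int) + 1) * (k : Int) := by positivity
  rw [PySem.List.slice_toNat cs ha hb]
  have e1 : (((j : Int) + 1) * (k : Int)).toNat = (j + 1) * k := by
    rw [show ((j : Int) + 1) * (k : Int) = (((j + 1) * k : Nat) : Int) from by push_cast; ring,
        Int.toNat_natCast]
  have e2 : ((j : Int) * (k : Int)).toNat = j * k := by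
    rw [show (j : Int) * (k : Int) = ((j * k : Nat) : Int) from by push_cast; ring,
        Int.toNat_natCast]
  rw [e1, e2, show (j + 1) * k - j * k = k from by rw [Nat.add_mul]; omega]

theorem rearrange_eq (word : String) (num : Int) (hnum : num ≠ 0) :
    rearrange_word word num = rearrange_word_alt word num := by
  unfold rearrange_word rearrange_word_alt
  by_cases hmod : PySem.Int.mod (word.toList.length : Int) num ≠ 0
  · simp only [if_pos hmod]
  · simp only [if_neg hmod]
    have hmod' := not_not.mp hmod
    set L := word.toList with hL
    rcases lt_or_gt_of_ne hnum with hneg | hpos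
    · -- num < 0: A's range is empty; B never flushes
      rw [PySem.List.pyRange_one_eq_nil (by omega)]
      simp only [List.foldl_nil]
      rcases List.eq_nil_or_concat L with hnil | _
      · rw [hnil]; rfl
      · have hkneg : PySem.Int.floordiv (L.length : Int) num < 0 ∨ L.length = 0 := by
          by_cases hz : L.length = 0
          · right; exact hz
          · left
            have h1 : 0 < (L.length : Int) := by
              have := Nat.pos_of_ne_zero hz; exact_mod_cast this
            have h2 : (L.length : Int).fdiv num < 0 := pvFdivNeg _ _ h1 hneg
            simpa [PySem.Int.floordiv] using h2
        rcases hkneg with hk | hz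
        · congr 1
          rw [stepB_neg _ hk L [] []]
          rfl
        · rw [List.eq_nil_of_length_eq_zero hz]; rfl
    · -- num > 0
      congr 1
      have hdvd : num ∣ (L.length : Int) := (PySem.Int.mod_eq_zero_iff_dvd _ _).mp hmod'
      obtain ⟨n, hn⟩ : ∃ n : Nat, num = (n : Int) := ⟨num.toNat, (Int.toNat_of_nonneg (le_of_lt hpos)).symm⟩
      set k : Nat := L.length / n with hkdef
      have hnpos : 0 < n := by omega
      have hlen : L.length = n * k := by
        have hnd : n ∣ L.length := Int.ofNat_dvd.mp (hn ▸ hdvd)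
        rw [hkdef, Nat.mul_div_cancel' hnd]
      have hc : PySem.Int.floordiv (L.length : Int) num = (k : Int) := by
        rw [hn, hkdef]; exact_mod_cast PySem.Int.floordiv_natCast L.length n
      rw [hc, hn]
      rw [a_side k n L]
      by_cases hkz : k = 0
      · have hlen0 : L.length = 0 := by rw [hkz, Nat.mul_zero] at hlen; exact hlen
        have hLnil : L = [] := List.eq_nil_of_length_eq_zero hlen0
        rw [hLnil]
        simp
      · rw [stepB_main k (Nat.pos_of_ne_zero hkz) n L [] hlen]
        simp [List.flatMap_def]

-- ===== VERDICT (by name: the statement is the Claim_ definition above) =====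
theorem rearrange_word_spec : Claim_equal_rearrange_word := by
  intro word num _ hpre
  unfold Spec_rearrange_word
  exact rearrange_eq word num hpre
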